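-- pv_equiv track=rewrite | github.com/DearthFunk/AdventOfCodeSaves | 2019/01.py | part_two
-- ===== SOURCE A (Python) =====
-- import math
--
-- def get_fuel_based_on_mass(mass):
-- 	return math.floor(mass/3) - 2
--
-- def part_two(data):
-- 	total = 0
-- 	for mass in data:
-- 		fuel = get_fuel_based_on_mass(mass)
-- 		while fuel > 0:
-- 			total += fuel
-- 			fuel = get_fuel_based_on_mass(fuel)
--
-- 	return total
-- ===== SOURCE B (Python) =====
-- import math
--
-- def _fuel(m):
--     f = math.floor(m / 3) - 2
--     return 0 if f <= 0 else f + _fuel(f)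
--
-- def part_two(data):
--     return sum(_fuel(mass) for mass in data)
-- ===== Notes on version B (the rewrite author's own statement) =====
-- stated objective: simpler
-- what changed: Replaced the explicit while loop threading mutable total/fuel state with a recursive per-mass fuel function whose results are summed with a generator expression.
import Mathlib
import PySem

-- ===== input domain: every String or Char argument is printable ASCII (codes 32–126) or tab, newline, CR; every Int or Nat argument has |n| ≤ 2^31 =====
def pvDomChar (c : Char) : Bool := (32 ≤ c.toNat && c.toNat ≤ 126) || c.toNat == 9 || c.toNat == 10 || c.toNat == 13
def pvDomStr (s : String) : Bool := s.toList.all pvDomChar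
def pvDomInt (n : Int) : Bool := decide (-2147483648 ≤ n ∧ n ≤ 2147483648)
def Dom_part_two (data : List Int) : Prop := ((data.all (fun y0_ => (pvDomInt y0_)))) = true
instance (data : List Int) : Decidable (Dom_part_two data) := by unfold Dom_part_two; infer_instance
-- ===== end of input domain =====

-- B replaces A's explicit while loop over mutable total/fuel state by a recursive
-- per-mass fuel function whose results are summed (simpler decomposition, same cost).

-- ===== PORT A =====
-- math.floor(mass/3) on an int with |mass| ≤ 2^31 is exactly floor division by 3
-- (the float quotient's rounding error is far smaller than the 1/3 gap to the next integer).
def get_fuel_based_on_mass (mass : Int) : Int := PySem.Int.floordiv mass 3 - 2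

-- the 'while fuel > 0' loop of A, threading (fuel, total)
def part_two_loop (fuel total : Int) : Int :=
  if 0 < fuel then
    part_two_loop (get_fuel_based_on_mass fuel) (total + fuel)
  else total
termination_by fuel.toNat
decreasing_by
  have h3 : PySem.Int.floordiv fuel 3 = fuel / 3 :=
    PySem.Int.floordiv_eq_ediv_of_pos (by omega)
  have := Int.ediv_le_self 3 (le_of_lt (by omega : (0:Int) < fuel))
  simp only [get_fuel_based_on_mass, h3]
  omega

def part_two (data : List Int) : Int :=
  data.foldl (fun total mass => part_two_loop (get_fuel_based_on_mass mass) total) 0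

-- ===== PORT B =====
def fuelB (m : Int) : Int :=
  if PySem.Int.floordiv m 3 - 2 ≤ 0 then 0
  else (PySem.Int.floordiv m 3 - 2) + fuelB (PySem.Int.floordiv m 3 - 2)
termination_by m.toNat
decreasing_by
  have h3 : PySem.Int.floordiv m 3 = m / 3 := by
    exact PySem.Int.floordiv_eq_ediv_of_pos (by omega)
  have h9 : 3 ≤ m / 3 := by omega
  have : (3:Int) * 3 ≤ m := (Int.le_ediv_iff_mul_le (by norm_num)).mp h9
  have := Int.ediv_le_self 3 (by omega : (0:Int) ≤ m)
  omega

def part_two_alt (data : List Int) : Int := (data.map fuelB).sum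

-- ===== PRECONDITION & SPEC =====
def Spec_part_two (data : List Int) (out : Int) : Prop := out = part_two_alt data
instance (data : List Int) (out : Int) : Decidable (Spec_part_two data out) := by unfold Spec_part_two; infer_instance

-- ===== CLAIM (what is proved, stated in full; the proofs are below) =====
def Claim_equal_part_two : Prop := ∀ (data : List Int), Dom_part_two data → Spec_part_two data (part_two data)

-- ===== LEMMAS AND PROOFS =====

-- the value A's while loop adds to `total`, as a function of the initial fuel
def fuelChain (f : Int) : Int := if 0 < f then f + fuelB f else 0

lemma part_two_loop_eq (f t : Int) : part_two_loop f t = t + fuelChain f := by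
  induction f, t using part_two_loop.induct with
  | case1 fuel total h ih =>
    rw [part_two_loop, if_pos h, ih,
      show fuelChain fuel = fuel + fuelB fuel from by rw [fuelChain, if_pos h],
      fuelB]
    unfold fuelChain get_fuel_based_on_mass
    split_ifs <;> first | ring1 | (exfalso; omega)
  | case2 fuel total h =>
    rw [part_two_loop, if_neg h, fuelChain, if_neg h]
    ring

lemma fuelB_eq_chain (m : Int) : fuelB m = fuelChain (get_fuel_based_on_mass m) := by
  rw [fuelB, fuelChain, get_fuel_based_on_mass]
  split_ifs with h1 h2 <;> first | rfl | ring1 | (exfalso; omega)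

lemma fold_eq (l : List Int) (t : Int) :
    l.foldl (fun total mass => part_two_loop (get_fuel_based_on_mass mass) total) t
      = t + (l.map fuelB).sum := by
  induction l generalizing t with
  | nil => simp
  | cons a l ih =>
    simp only [List.foldl_cons, List.map_cons, List.sum_cons]
    rw [part_two_loop_eq, ih, ← fuelB_eq_chain]
    ring

-- ===== VERDICT (by name: the statement is the Claim_ definition above) =====
theorem part_two_spec : Claim_equal_part_two := by
  intro data _
  unfold Spec_part_two part_two part_two_alt
  rw [fold_eq]
  ring
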